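-- pv_equiv track=rewrite | github.com/Fafer77/AI | SI/lista1/zad5.py | get_flip_improvement
-- ===== SOURCE A (Python) =====
-- from typing import List
--
-- def opt_dist(nonogram: List[int], d: int) -> int:
--     if d == 0:
--         return sum(nonogram)
--
--     n = len(nonogram)
--     one_count_window = sum(nonogram[i] for i in range(d))
--     total_one_count = sum(nonogram[i] for i in range(n))
--     swap_count = d - one_count_window
--     min_swap_count = swap_count + (total_one_count - one_count_window)
--
--     for i in range(1, n - d + 1):
--         if nonogram[i - 1] == 1:
--             one_count_window -= 1
--
--         if nonogram[i + d - 1] == 1: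
--             one_count_window += 1
--
--         swap_count = d - one_count_window + (total_one_count - one_count_window)
--         min_swap_count = min(min_swap_count, swap_count)
--
--     return min_swap_count
--
-- def change_bit(bit: int) -> int:
--     return 1 if bit == 0 else 0
--
-- def get_flip_improvement(board: List[List[int]], row: int, col: int,
--                          rows_spec: List[int], cols_spec: List[int]) -> int:
--
--     old_row_cost = opt_dist(board[row], rows_spec[row])
--     old_col_bits = [board[r][col] for r in range(len(board))]
--     old_col_cost = opt_dist(old_col_bits, cols_spec[col])
--
--     old_bit = board[row][col]
--     board[row][col] = change_bit(old_bit)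
--
--     new_row_cost = opt_dist(board[row], rows_spec[row])
--     new_col_bits = [board[r][col] for r in range(len(board))]
--     new_col_cost = opt_dist(new_col_bits, cols_spec[col])
--
--     board[row][col] = old_bit
--
--     return (old_row_cost + old_col_cost) - (new_row_cost + new_col_cost)
-- ===== SOURCE B (Python) =====
-- from typing import List
--
-- def _cost(line: List[int], d: int) -> int:
--     # swaps needed = d + total - 2 * (best window score); window score at offset i
--     # is the base window sum adjusted by the ones entering/leaving, expressed in
--     # closed form with a prefix-count array of ones.
--     if d == 0:
--         return sum(line)
--     total = sum(line)
--     pref = [0]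
--     for x in line:
--         pref.append(pref[-1] + (1 if x == 1 else 0))
--     base = sum(line[:d])
--     best = max(base + pref[i + d] - pref[d] - pref[i] for i in range(len(line) - d + 1))
--     return d + total - 2 * best
--
-- def get_flip_improvement(board: List[List[int]], row: int, col: int,
--                          rows_spec: List[int], cols_spec: List[int]) -> int:
--     old_row = board[row]
--     old_col = [r[col] for r in board]
--     flipped = 1 if old_row[col] == 0 else 0
--     new_row = list(old_row)
--     new_row[col] = flipped
--     new_col = list(old_col)
--     new_col[row] = flipped
--     dr, dc = rows_spec[row], cols_spec[col]
--     return (_cost(old_row, dr) - _cost(new_row, dr)) + (_cost(old_col, dc) - _cost(new_col, dc))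
-- ===== Notes on version B (the rewrite author's own statement) =====
-- stated objective: simpler
-- what changed: opt_dist's incremental swap-count/running-minimum loop is replaced by the closed form d + total - 2*max(window score) with window scores read off a prefix-count array, and the flip is applied to fresh copies of the row and column instead of mutating and restoring the board (so B has no side effects where A temporarily mutates board).
import Mathlib
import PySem

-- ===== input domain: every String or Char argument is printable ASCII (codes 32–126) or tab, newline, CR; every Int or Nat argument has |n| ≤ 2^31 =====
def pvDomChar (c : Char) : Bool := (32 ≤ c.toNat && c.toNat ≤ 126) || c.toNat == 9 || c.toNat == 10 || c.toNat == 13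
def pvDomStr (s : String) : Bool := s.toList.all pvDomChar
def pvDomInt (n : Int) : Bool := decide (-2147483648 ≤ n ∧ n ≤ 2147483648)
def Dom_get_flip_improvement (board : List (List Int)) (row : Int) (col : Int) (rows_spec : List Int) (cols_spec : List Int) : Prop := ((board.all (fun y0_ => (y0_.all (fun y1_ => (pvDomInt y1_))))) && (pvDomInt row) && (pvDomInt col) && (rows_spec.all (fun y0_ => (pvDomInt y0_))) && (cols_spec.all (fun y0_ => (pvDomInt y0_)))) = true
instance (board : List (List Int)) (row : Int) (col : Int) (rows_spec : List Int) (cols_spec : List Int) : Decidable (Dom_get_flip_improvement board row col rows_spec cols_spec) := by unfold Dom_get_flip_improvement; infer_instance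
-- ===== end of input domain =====

-- B replaces A's incremental swap-count/min accumulator by a closed formula (answer = d + total - 2·best
-- window score, windows read off a prefix-count array and maximised), and flips the cell in fresh copies
-- of the row/column instead of mutating and restoring the board; return value only — A temporarily
-- mutates `board` in place (and restores it), B never touches it.

-- ===== PORT A =====
-- literal port of opt_dist: running window counter + running minimum over range(1, n-d+1)
def opt_dist (nonogram : List Int) (d : Int) : Int :=
  if d = 0 then nonogram.sum
  else
    let n : Int := PySem.List.len nonogram
    let w0 : Int := ((PySem.List.pyRange 0 d).map (fun i => PySem.List.pyGetD nonogram i 0)).sum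
    let T : Int := ((PySem.List.pyRange 0 n).map (fun i => PySem.List.pyGetD nonogram i 0)).sum
    let m0 : Int := (d - w0) + (T - w0)
    let st := (PySem.List.pyRange 1 (n - d + 1)).foldl (fun (st : Int × Int) i =>
      let w1 := if PySem.List.pyGetD nonogram (i - 1) 0 = 1 then st.1 - 1 else st.1
      let w2 := if PySem.List.pyGetD nonogram (i + d - 1) 0 = 1 then w1 + 1 else w1
      (w2, min st.2 (d - w2 + (T - w2)))) (w0, m0)
    st.2

def change_bit (bit : Int) : Int := if bit = 0 then 1 else 0

-- A mutates board[row][col] and restores it; the mutated board is the value board2 below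
def get_flip_improvement (board : List (List Int)) (row : Int) (col : Int) (rows_spec : List Int) (cols_spec : List Int) : Int :=
  let old_row_cost := opt_dist (PySem.List.pyGetD board row []) (PySem.List.pyGetD rows_spec row 0)
  let old_col_bits := (PySem.List.pyRange 0 (PySem.List.len board)).map
    (fun r => PySem.List.pyGetD (PySem.List.pyGetD board r []) col 0)
  let old_col_cost := opt_dist old_col_bits (PySem.List.pyGetD cols_spec col 0)
  let old_bit := PySem.List.pyGetD (PySem.List.pyGetD board row []) col 0
  let board2 := PySem.List.pySetD board row
    (PySem.List.pySetD (PySem.List.pyGetD board row []) col (change_bit old_bit))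
  let new_row_cost := opt_dist (PySem.List.pyGetD board2 row []) (PySem.List.pyGetD rows_spec row 0)
  let new_col_bits := (PySem.List.pyRange 0 (PySem.List.len board2)).map
    (fun r => PySem.List.pyGetD (PySem.List.pyGetD board2 r []) col 0)
  let new_col_cost := opt_dist new_col_bits (PySem.List.pyGetD cols_spec col 0)
  (old_row_cost + old_col_cost) - (new_row_cost + new_col_cost)

-- ===== PORT B =====
-- closed-form cost: d + total - 2 * max window score, windows read off a prefix-count array
def cost_alt (line : List Int) (d : Int) : Int :=
  if d = 0 then line.sum
  else
    let total := line.sum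
    let pref := line.foldl
      (fun p x => p ++ [PySem.List.pyGetD p (-1) 0 + (if x = 1 then (1:Int) else 0)]) [0]
    let base := (PySem.List.slice line none (some d)).sum
    let vals := (PySem.List.pyRange 0 (PySem.List.len line - d + 1)).map
      (fun i => base + PySem.List.pyGetD pref (i + d) 0 - PySem.List.pyGetD pref d 0
        - PySem.List.pyGetD pref i 0)
    d + total - 2 * ((PySem.List.max? vals id).getD 0)

def get_flip_improvement_alt (board : List (List Int)) (row : Int) (col : Int) (rows_spec : List Int) (cols_spec : List Int) : Int :=
  let old_row := PySem.List.pyGetD board row []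
  let old_col := board.map (fun r => PySem.List.pyGetD r col 0)
  let flipped : Int := if PySem.List.pyGetD old_row col 0 = 0 then 1 else 0
  let new_row := PySem.List.pySetD old_row col flipped
  let new_col := PySem.List.pySetD old_col row flipped
  let dr := PySem.List.pyGetD rows_spec row 0
  let dc := PySem.List.pyGetD cols_spec col 0
  (cost_alt old_row dr - cost_alt new_row dr) + (cost_alt old_col dc - cost_alt new_col dc)

-- ===== PRECONDITION & SPEC =====
-- Pre_ is exactly the set of inputs on which A returns: row/col must be valid Python indices for board,
-- the spec lists and every board row, and the two selected spec values must lie in [0, line length] —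
-- outside that A raises IndexError (in the indexing itself, or inside opt_dist: its window sum for d > n,
-- its sliding loop for d < 0).
def Pre_get_flip_improvement (board : List (List Int)) (row : Int) (col : Int) (rows_spec : List Int) (cols_spec : List Int) : Prop :=
  PySem.Raise.InRange board.length row ∧
  PySem.Raise.InRange rows_spec.length row ∧
  PySem.Raise.InRange cols_spec.length col ∧
  (∀ r ∈ board, PySem.Raise.InRange r.length col) ∧
  (0 ≤ PySem.List.pyGetD rows_spec row 0 ∧
    PySem.List.pyGetD rows_spec row 0 ≤ (PySem.List.pyGetD board row []).length) ∧
  (0 ≤ PySem.List.pyGetD cols_spec col 0 ∧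
    PySem.List.pyGetD cols_spec col 0 ≤ board.length)

instance (board : List (List Int)) (row : Int) (col : Int) (rows_spec : List Int) (cols_spec : List Int) : Decidable (Pre_get_flip_improvement board row col rows_spec cols_spec) := by
  unfold Pre_get_flip_improvement PySem.Raise.InRange; infer_instance

def pvWitness_get_flip_improvement : List (List Int) × Int × Int × List Int × List Int :=
  ([[1, 0], [0, 1]], 0, 1, [1, 2], [1, 1])

def Spec_get_flip_improvement (board : List (List Int)) (row : Int) (col : Int) (rows_spec : List Int) (cols_spec : List Int) (out : Int) : Prop := out = get_flip_improvement_alt board row col rows_spec cols_spec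
instance (board : List (List Int)) (row : Int) (col : Int) (rows_spec : List Int) (cols_spec : List Int) (out : Int) : Decidable (Spec_get_flip_improvement board row col rows_spec cols_spec out) := by unfold Spec_get_flip_improvement; infer_instance

-- ===== CLAIM (what is proved, stated in full; the proofs are below) =====
def Claim_equal_get_flip_improvement : Prop := ∀ (board : List (List Int)) (row : Int) (col : Int) (rows_spec : List Int) (cols_spec : List Int), Dom_get_flip_improvement board row col rows_spec cols_spec → Pre_get_flip_improvement board row col rows_spec cols_spec → Spec_get_flip_improvement board row col rows_spec cols_spec (get_flip_improvement board row col rows_spec cols_spec)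

-- ===== LEMMAS AND PROOFS =====

-- normalised Python index
def normIdx (n : Nat) (i : Int) : Nat := if 0 ≤ i then i.toNat else n - (-i).toNat

lemma normIdx_lt {n : Nat} {i : Int} (h : PySem.Raise.InRange n i) : normIdx n i < n := by
  rcases h with ⟨h1, h2⟩; unfold normIdx; split_ifs with h0 <;> omega

lemma pyIdx?_norm {n : Nat} {i : Int} (h : PySem.Raise.InRange n i) :
    PySem.List.pyIdx? n i = some (normIdx n i) := by
  rcases h with ⟨h1, h2⟩
  unfold PySem.List.pyIdx? normIdx
  split_ifs <;> simp_all

lemma pyGetD_norm {α : Type} (xs : List α) (i : Int) (d : α) (h : PySem.Raise.InRange xs.length i) :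
    PySem.List.pyGetD xs i d = xs.getD (normIdx xs.length i) d := by
  simp [PySem.List.pyGetD, PySem.List.pyGet?, pyIdx?_norm h, List.getD]

lemma pySetD_norm {α : Type} (xs : List α) (i : Int) (v : α) (h : PySem.Raise.InRange xs.length i) :
    PySem.List.pySetD xs i v = xs.set (normIdx xs.length i) v := by
  simp [PySem.List.pySetD, PySem.List.pySet?, pyIdx?_norm h]

-- ones indicator and prefix count
def oneBit (x : Int) : Int := if x = 1 then 1 else 0

def Pf (line : List Int) (k : Nat) : Int := ((line.map oneBit).take k).sum

lemma Pf_succ (line : List Int) (k : Nat) (h : k < line.length) :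
    Pf line (k + 1) = Pf line k + oneBit (line.getD k 0) := by
  unfold Pf
  rw [List.take_succ]
  have h' : k < (line.map oneBit).length := by simpa using h
  simp [List.getD, List.getElem?_eq_getElem h', List.getElem?_eq_getElem h]

lemma range_map_getD (line : List Int) (m : Nat) (h : m ≤ line.length) :
    (List.range m).map (fun k => line.getD k 0) = line.take m := by
  induction m with
  | zero => simp
  | succ m ih =>
    rw [List.range_succ, List.map_append, ih (by omega), List.take_succ]
    simp [List.getD, List.getElem?_eq_getElem (show m < line.length by omega)]

-- window score
def Wsc (line : List Int) (dn k : Nat) : Int :=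
  (line.take dn).sum + Pf line (k + dn) - Pf line dn - Pf line k

-- the prefix list built by B's fold is the table of Pf values
lemma pref_eq (line : List Int) :
    line.foldl (fun p x => p ++ [PySem.List.pyGetD p (-1) 0 + (if x = 1 then (1:Int) else 0)]) [0]
      = (List.range (line.length + 1)).map (Pf line) := by
  induction line using List.reverseRecOn with
  | nil => simp [Pf]
  | append_singleton l x ih =>
    rw [List.foldl_append, ih]
    have hPf : ∀ k, k ≤ l.length → Pf (l ++ [x]) k = Pf l k := by
      intro k hk
      unfold Pf
      rw [List.map_append, List.take_append_of_le_length (by simpa using hk)]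
    have hlast : Pf (l ++ [x]) (l.length + 1) = Pf l l.length + oneBit x := by
      unfold Pf
      simp [List.take_of_length_le]
    simp only [List.foldl_cons, List.foldl_nil]
    have hx : PySem.List.pyGetD ((List.range (l.length + 1)).map (Pf l)) (-1) 0
        = Pf l l.length := by
      rw [List.range_succ, List.map_append, List.map_cons, List.map_nil]
      exact PySem.List.pyGetD_neg_one_append_singleton _ _ _
    rw [hx]
    conv_rhs => rw [show (l ++ [x]).length + 1 = (l.length + 1) + 1 by simp,
      List.range_succ, List.map_append]
    congr 1
    · exact (List.map_congr_left fun k hk =>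
        hPf k (Nat.le_of_lt_succ (List.mem_range.mp hk))).symm
    · simp [hlast, oneBit]

-- folded Python max equals foldl max
lemma max_getD : ∀ (t : List Int) (h : Int),
    ((PySem.List.max? (h :: t) id).getD 0) = t.foldl max h := by
  intro t
  induction t with
  | nil => intro h; rfl
  | cons x t ih =>
    intro h
    have hstep : PySem.List.max? (h :: x :: t) id = PySem.List.max? (max h x :: t) id := by
      unfold PySem.List.max?
      rw [List.foldl_cons, List.foldl_cons, List.foldl_cons]
      dsimp only
      rcases lt_or_ge h x with h' | h'
      · rw [if_pos (show id h < id x from h'), max_eq_right (le_of_lt h')]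
      · rw [if_neg (show ¬ id h < id x from not_lt.mpr h'), max_eq_left h']
    rw [hstep, ih (max h x), List.foldl_cons]

-- min/max duality for the affine map w ↦ c - 2w
lemma min_max_dual (c : Int) (t : List Int) : ∀ h : Int,
    (t.map (fun w => c - 2 * w)).foldl min (c - 2 * h) = c - 2 * t.foldl max h := by
  induction t with
  | nil => intro h; rfl
  | cons x t ih =>
    intro h
    simp only [List.map_cons, List.foldl_cons]
    rw [show min (c - 2 * h) (c - 2 * x) = c - 2 * max h x by
      rcases le_total h x with h' | h' <;> simp [max_def, min_def] <;> omega]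
    exact ih (max h x)

-- one step of A's sliding window
lemma step_eq (line : List Int) (dn : Nat) (a : Nat) (ha : 1 ≤ a) (ha' : a + dn ≤ line.length)
    (hdn : 1 ≤ dn) :
    (if PySem.List.pyGetD line ((a : Int) + (dn : Int) - 1) 0 = 1
       then (if PySem.List.pyGetD line ((a : Int) - 1) 0 = 1 then Wsc line dn (a - 1) - 1
             else Wsc line dn (a - 1)) + 1
       else (if PySem.List.pyGetD line ((a : Int) - 1) 0 = 1 then Wsc line dn (a - 1) - 1
             else Wsc line dn (a - 1)))
      = Wsc line dn a := by
  have e1 : ((a : Int) - 1) = ((a - 1 : Nat) : Int) := by omega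
  have e2 : ((a : Int) + (dn : Int) - 1) = ((a + dn - 1 : Nat) : Int) := by omega
  rw [e1, e2, PySem.List.pyGetD_natCast, PySem.List.pyGetD_natCast]
  have hp1 : Pf line a = Pf line (a - 1) + oneBit (line.getD (a - 1) 0) := by
    have := Pf_succ line (a - 1) (by omega)
    rwa [show a - 1 + 1 = a by omega] at this
  have hp2 : Pf line (a + dn) = Pf line (a + dn - 1) + oneBit (line.getD (a + dn - 1) 0) := by
    have := Pf_succ line (a + dn - 1) (by omega)
    rwa [show a + dn - 1 + 1 = a + dn by omega] at this
  have e3 : a - 1 + dn = a + dn - 1 := by omega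
  unfold Wsc
  rw [e3]
  unfold oneBit at hp1 hp2
  split_ifs with h2 h1 h1 <;>
    (first | rw [if_pos h1] at hp1 | rw [if_neg h1] at hp1) <;>
    (first | rw [if_pos h2] at hp2 | rw [if_neg h2] at hp2) <;> omega

-- A's loop computes the running minimum of the window costs
lemma loopA (line : List Int) (dn : Nat) (T : Int) :
    ∀ (k : Nat) (a : Nat) (acc : Int), 1 ≤ a → 1 ≤ dn → a + k + dn = line.length + 1 →
    ((PySem.List.pyRange (a : Int) ((line.length : Int) - (dn : Int) + 1)).foldl
        (fun (st : Int × Int) i =>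
          let w1 := if PySem.List.pyGetD line (i - 1) 0 = 1 then st.1 - 1 else st.1
          let w2 := if PySem.List.pyGetD line (i + (dn : Int) - 1) 0 = 1 then w1 + 1 else w1
          (w2, min st.2 ((dn : Int) - w2 + (T - w2)))) (Wsc line dn (a - 1), acc)).2
      = (((PySem.List.pyRange (a : Int) ((line.length : Int) - (dn : Int) + 1)).map
          (fun i => Wsc line dn i.toNat)).map (fun w => (dn : Int) + T - 2 * w)).foldl min acc := by
  intro k
  induction k with
  | zero =>
    intro a acc _ _ hlen
    rw [PySem.List.pyRange_one_eq_nil (by omega)]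
    simp
  | succ k ih =>
    intro a acc ha hdn hlen
    rw [PySem.List.pyRange_one_cons (by omega)]
    rw [List.foldl_cons, List.map_cons, List.map_cons, List.foldl_cons]
    dsimp only
    rw [step_eq line dn a ha (by omega) hdn]
    simp only [Int.toNat_natCast]
    rw [show ((dn : Int) - Wsc line dn a + (T - Wsc line dn a))
        = ((dn : Int) + T - 2 * Wsc line dn a) from by ring]
    have := ih (a + 1) (min acc ((dn : Int) + T - 2 * Wsc line dn a)) (by omega) hdn (by omega)
    rw [show (((a + 1 : Nat)) : Int) = (a : Int) + 1 by omega] at this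
    rw [show (a + 1 - 1) = a by omega] at this
    exact this

-- the central lemma: on 0 ≤ d ≤ len, A's opt_dist equals B's closed-form cost
lemma opt_eq_cost (line : List Int) (d : Int) (h0 : 0 ≤ d) (h1 : d ≤ (line.length : Int)) :
    opt_dist line d = cost_alt line d := by
  unfold opt_dist cost_alt
  by_cases hd0 : d = 0
  · simp [hd0]
  · simp only [if_neg hd0]
    obtain ⟨dn, rfl⟩ : ∃ dn : Nat, d = (dn : Int) := ⟨d.toNat, (Int.toNat_of_nonneg h0).symm⟩
    have hdn1 : 1 ≤ dn := by omega
    have hdnl : dn ≤ line.length := by exact_mod_cast h1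
    -- the total
    have hT : ((PySem.List.pyRange 0 (PySem.List.len line)).map
        (fun i => PySem.List.pyGetD line i 0)).sum = line.sum := by
      rw [PySem.List.map_pyGetD_pyRange_zero]
    -- the base window sum
    have hw0 : ((PySem.List.pyRange 0 (dn : Int)).map (fun i => PySem.List.pyGetD line i 0)).sum
        = (line.take dn).sum := by
      rw [PySem.List.pyRange_one]
      simp only [Int.sub_zero, Int.toNat_natCast, List.map_map]
      rw [show ((fun i => PySem.List.pyGetD line i 0) ∘ fun k : Nat => (0 : Int) + (k : Int))
          = fun k : Nat => line.getD k 0 by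
        funext k; simp [PySem.List.pyGetD_natCast]]
      rw [range_map_getD line dn hdnl]
    have hbase : (PySem.List.slice line none (some (dn : Int))).sum = (line.take dn).sum := by
      rw [PySem.List.slice_to line (by omega)]
      simp
    -- the values list is the list of window scores pushed through the affine map
    have hvals : ((PySem.List.pyRange 0 ((PySem.List.len line) - (dn : Int) + 1)).map
        (fun i => (PySem.List.slice line none (some (dn : Int))).sum
          + PySem.List.pyGetD (line.foldl (fun p x =>
              p ++ [PySem.List.pyGetD p (-1) 0 + (if x = 1 then (1:Int) else 0)]) [0]) (i + (dn : Int)) 0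
          - PySem.List.pyGetD (line.foldl (fun p x =>
              p ++ [PySem.List.pyGetD p (-1) 0 + (if x = 1 then (1:Int) else 0)]) [0]) (dn : Int) 0
          - PySem.List.pyGetD (line.foldl (fun p x =>
              p ++ [PySem.List.pyGetD p (-1) 0 + (if x = 1 then (1:Int) else 0)]) [0]) i 0))
        = (PySem.List.pyRange 0 ((PySem.List.len line) - (dn : Int) + 1)).map
            (fun i => Wsc line dn i.toNat) := by
      apply List.map_congr_left
      intro i hi
      rw [PySem.List.mem_pyRange_one] at hi
      unfold PySem.List.len at hi
      rw [pref_eq]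
      have hget : ∀ j : Int, 0 ≤ j → j ≤ (line.length : Int) →
          PySem.List.pyGetD ((List.range (line.length + 1)).map (Pf line)) j 0 = Pf line j.toNat := by
        intro j hj hj'
        obtain ⟨jn, rfl⟩ : ∃ jn : Nat, j = (jn : Int) := ⟨j.toNat, (Int.toNat_of_nonneg hj).symm⟩
        rw [PySem.List.pyGetD_natCast, PySem.List.getD_map_range _ _ _ _ (by omega)]
        simp
      rw [hget (i + dn) (by omega) (by omega), hget (dn : Int) (by omega) (by omega),
        hget i (by omega) (by omega), hbase]
      unfold Wsc
      rw [show (i + (dn : Int)).toNat = i.toNat + dn by omega, Int.toNat_natCast]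
    rw [hvals, hT, hw0]
    -- split off index 0
    have hsplit : PySem.List.pyRange 0 ((PySem.List.len line) - (dn : Int) + 1)
        = 0 :: PySem.List.pyRange 1 ((PySem.List.len line) - (dn : Int) + 1) := by
      have h := PySem.List.pyRange_one_cons
        (a := 0) (b := (PySem.List.len line) - (dn : Int) + 1)
        (by unfold PySem.List.len; omega)
      rwa [show (0 : Int) + 1 = 1 from rfl] at h
    have hW0 : Wsc line dn 0 = (line.take dn).sum := by unfold Wsc Pf; simp
    rw [hsplit]
    simp only [List.map_cons]
    rw [show ((0 : Int).toNat) = 0 from rfl, max_getD]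
    have hloop := loopA line dn line.sum (line.length - dn) 1
      ((dn : Int) - (line.take dn).sum + (line.sum - (line.take dn).sum)) le_rfl hdn1 (by omega)
    simp only [Nat.cast_one, show (1 : Nat) - 1 = 0 from rfl] at hloop
    rw [hW0] at hloop
    unfold PySem.List.len
    rw [hloop]
    have hdual := min_max_dual ((dn : Int) + line.sum)
      ((PySem.List.pyRange 1 ((line.length : Int) - (dn : Int) + 1)).map (fun i => Wsc line dn i.toNat))
      (Wsc line dn 0)
    rw [hW0] at hdual
    rw [show ((dn : Int) - (line.take dn).sum + (line.sum - (line.take dn).sum))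
        = ((dn : Int) + line.sum) - 2 * (line.take dn).sum by ring] at *
    rw [hW0, ← hdual]

-- get/set at the same (possibly negative) Python index
lemma getD_set_norm {α : Type} (xs : List α) (i : Int) (v d : α) (h : PySem.Raise.InRange xs.length i) :
    PySem.List.pyGetD (xs.set (normIdx xs.length i) v) i d = v := by
  rw [pyGetD_norm _ i d (by simpa using h)]
  rw [List.length_set]
  rw [List.getD_eq_getElem?_getD, List.getElem?_set_self (by exact normIdx_lt h)]
  rfl

-- A's column comprehension is a map over the rows
lemma colbits_eq (board : List (List Int)) (col : Int) :
    (PySem.List.pyRange 0 (PySem.List.len board)).map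
      (fun r => PySem.List.pyGetD (PySem.List.pyGetD board r []) col 0)
    = board.map (fun rr => PySem.List.pyGetD rr col 0) := by
  rw [show (fun r => PySem.List.pyGetD (PySem.List.pyGetD board r []) col 0)
      = ((fun rr => PySem.List.pyGetD rr col 0) ∘ (fun r => PySem.List.pyGetD board r [])) from rfl]
  rw [← List.map_map, PySem.List.map_pyGetD_pyRange_zero]

-- ===== VERDICT (by name: the statement is the Claim_ definition above) =====
theorem get_flip_improvement_spec : Claim_equal_get_flip_improvement := by
  intro board row col rows_spec cols_spec _ hpre
  obtain ⟨hbr, hsr, hsc, hcols, ⟨hdr0, hdr1⟩, ⟨hdc0, hdc1⟩⟩ := hpre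
  unfold Spec_get_flip_improvement get_flip_improvement get_flip_improvement_alt change_bit
  dsimp only
  rw [colbits_eq]
  set orow := PySem.List.pyGetD board row ([] : List Int) with horow
  set fl := (if PySem.List.pyGetD orow col 0 = 0 then (1 : Int) else 0) with hfl
  set nrow := PySem.List.pySetD orow col fl with hnrow
  set g := fun rr : List Int => PySem.List.pyGetD rr col 0 with hg
  have horowmem : orow ∈ board := by
    rw [horow, pyGetD_norm board row [] hbr, List.getD_eq_getElem?_getD,
      List.getElem?_eq_getElem (normIdx_lt hbr)]
    exact List.getElem_mem _
  have hcol_or := hcols orow horowmem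
  rw [pySetD_norm board row nrow hbr]
  rw [getD_set_norm board row nrow [] hbr]
  rw [colbits_eq (board.set (normIdx board.length row) nrow) col]
  rw [List.map_set]
  have h3 : PySem.List.pyGetD nrow col 0 = fl := by
    rw [hnrow, pySetD_norm orow col fl hcol_or]
    exact getD_set_norm orow col fl 0 hcol_or
  rw [h3, ← hg]
  rw [pySetD_norm (board.map g) row fl (by simpa using hbr)]
  have hlm : (board.map g).length = board.length := List.length_map g
  rw [hlm]
  have hdrn : PySem.List.pyGetD rows_spec row 0 ≤ (nrow.length : Int) := by
    rw [hnrow, PySem.List.length_pySetD]; exact hdr1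
  have hdcm : PySem.List.pyGetD cols_spec col 0 ≤ ((board.map g).length : Int) := by
    rw [hlm]; exact hdc1
  have hdcs : PySem.List.pyGetD cols_spec col 0
      ≤ (((board.map g).set (normIdx board.length row) fl).length : Int) := by
    rw [List.length_set, hlm]; exact hdc1
  rw [opt_eq_cost orow _ hdr0 hdr1, opt_eq_cost nrow _ hdr0 hdrn,
    opt_eq_cost (board.map g) _ hdc0 hdcm,
    opt_eq_cost ((board.map g).set (normIdx board.length row) fl) _ hdc0 hdcs]
  ring
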